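-- pv_equiv track=rewrite | github.com/mkay/edith | edith/services/ftp_client.py | _parse_permission_string
-- ===== SOURCE A (Python) =====
-- def _parse_permission_string(s: str) -> int:
--     """Convert 'rwxrwxrwx' to an octal mode integer."""
--     if len(s) != 9:
--         return 0
--     mode = 0
--     mapping = [
--         (0o400, 0), (0o200, 1), (0o100, 2),
--         (0o040, 3), (0o020, 4), (0o010, 5),
--         (0o004, 6), (0o002, 7), (0o001, 8),
--     ]
--     for bit, idx in mapping:
--         if s[idx] != "-":
--             mode |= bit
--     return mode
-- ===== SOURCE B (Python) =====
-- _TRIPLE_DIGIT = {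
--     "---": 0, "--x": 1, "-x-": 2, "-xx": 3,
--     "x--": 4, "x-x": 5, "xx-": 6, "xxx": 7,
-- }
--
--
-- def _parse_permission_string(s: str) -> int:
--     """Convert 'rwxrwxrwx' to an octal mode integer."""
--     if len(s) != 9:
--         return 0
--     digits = []
--     for i in (0, 3, 6):
--         key = "".join("-" if c == "-" else "x" for c in s[i:i + 3])
--         digits.append(_TRIPLE_DIGIT[key])
--     return sum(d * w for d, w in zip(digits, (64, 8, 1)))
-- ===== Notes on version B (the rewrite author's own statement) =====
-- stated objective: alternative
-- what changed: Replaces the per-character (octal-bit, index) OR-accumulation with a staged approach: each 3-char group is normalized to its dash pattern, converted to one octal digit via an 8-entry triple lookup table, and the three digits are combined with weights 64/8/1.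
import Mathlib
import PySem

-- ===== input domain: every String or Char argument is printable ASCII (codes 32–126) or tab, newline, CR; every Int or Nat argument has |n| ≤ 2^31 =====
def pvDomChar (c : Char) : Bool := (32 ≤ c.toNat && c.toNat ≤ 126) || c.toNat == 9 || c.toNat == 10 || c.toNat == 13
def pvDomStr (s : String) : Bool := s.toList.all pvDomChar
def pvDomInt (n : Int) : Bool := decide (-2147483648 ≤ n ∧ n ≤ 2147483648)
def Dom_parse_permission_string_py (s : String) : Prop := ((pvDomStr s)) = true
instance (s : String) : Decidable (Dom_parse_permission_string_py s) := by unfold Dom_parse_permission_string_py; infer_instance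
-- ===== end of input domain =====

-- B replaces A's per-character (octal-bit, index) accumulation with a staged triple-group scheme (normalize each 3-char group to its dash pattern, table it to an octal digit, combine the digits with weights 64/8/1); objective: alternative.


-- ===== PORT A =====
-- Literal port of A: length guard, then a fold over the (bit, index) mapping table,
-- OR-ing in the bit when s[idx] != '-'. The `.getD '-'` default is unreachable:
-- inside the branch the length is 9 and every index 0..8 is in range.
def parse_permission_string_py (s : String) : Int :=
  if PySem.Str.len s ≠ 9 then 0
  else
    [((256 : Int), (0 : Int)), (128, 1), (64, 2),
     (32, 3), (16, 4), (8, 5),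
     (4, 6), (2, 7), (1, 8)].foldl
      (fun mode p => if (PySem.Str.pyGet? s p.2).getD '-' ≠ '-' then Int.lor mode p.1 else mode) 0

-- ===== PORT B =====
-- the module-level _TRIPLE_DIGIT dict
def pvTripleDigit : PySem.Dict String Int :=
  PySem.Dict.ofList [("---", 0), ("--x", 1), ("-x-", 2), ("-xx", 3),
                     ("x--", 4), ("x-x", 5), ("xx-", 6), ("xxx", 7)]

-- key = "".join("-" if c == "-" else "x" for c in group)
def pvNormTriple (g : List Char) : String :=
  String.ofList (g.map (fun c => if c = '-' then '-' else 'x'))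

-- Port of B. The `.getD 0` default is unreachable: every normalized 3-char group is a table key.
def parse_permission_string_py_alt (s : String) : Int :=
  if PySem.Str.len s ≠ 9 then 0
  else
    let digits := [(0 : Int), 3, 6].map (fun i =>
      (pvTripleDigit.get? (pvNormTriple (PySem.List.slice s.toList (some i) (some (i + 3))))).getD 0)
    ((digits.zip [(64 : Int), 8, 1]).map (fun p => p.1 * p.2)).sum

-- ===== PRECONDITION & SPEC =====
def Spec_parse_permission_string_py (s : String) (out : Int) : Prop := out = parse_permission_string_py_alt s
instance (s : String) (out : Int) : Decidable (Spec_parse_permission_string_py s out) := by unfold Spec_parse_permission_string_py; infer_instance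

-- ===== CLAIM (what is proved, stated in full; the proofs are below) =====
def Claim_equal_parse_permission_string_py : Prop := ∀ (s : String), Dom_parse_permission_string_py s → Spec_parse_permission_string_py s (parse_permission_string_py s)

-- ===== LEMMAS AND PROOFS =====

-- one triple-table lookup of a normalized 3-char group is the 4/2/1 digit of its dash pattern
lemma pv_digit (a b c : Char) :
    (pvTripleDigit.get? (pvNormTriple [a, b, c])).getD 0 =
    (if a = '-' then 0 else 4) + (if b = '-' then 0 else 2) + (if c = '-' then 0 else 1) := by
  unfold pvNormTriple
  by_cases ha : a = '-' <;> by_cases hb : b = '-' <;> by_cases hc : c = '-' <;>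
    simp [ha, hb, hc, pvTripleDigit] <;> rfl

-- for every dash pattern of the 9 positions, A's bit accumulation equals B's weighted digit sum
lemma pv_key (b0 b1 b2 b3 b4 b5 b6 b7 b8 : Bool) :
    (List.foldl
      (fun (mode : Int) (p : Int × Bool) => if p.2 then mode else Int.lor mode p.1) 0
      [((256 : Int), b0), (128, b1), (64, b2), (32, b3), (16, b4), (8, b5), (4, b6), (2, b7), (1, b8)]) =
    (([(if b0 then (0:Int) else 4) + (if b1 then 0 else 2) + (if b2 then 0 else 1),
       (if b3 then (0:Int) else 4) + (if b4 then 0 else 2) + (if b5 then 0 else 1),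
       (if b6 then (0:Int) else 4) + (if b7 then 0 else 2) + (if b8 then 0 else 1)].zip
      [(64 : Int), 8, 1]).map (fun p => p.1 * p.2)).sum := by
  revert b0 b1 b2 b3 b4 b5 b6 b7 b8; decide

lemma pv_list9 {α : Type} (l : List α) (h : l.length = 9) :
    ∃ a b c d e f g i j, l = [a, b, c, d, e, f, g, i, j] := by
  match l, h with
  | [a, b, c, d, e, f, g, i, j], _ => exact ⟨a, b, c, d, e, f, g, i, j, rfl⟩

-- ===== VERDICT (by name: the statement is the Claim_ definition above) =====
theorem parse_permission_string_py_spec : Claim_equal_parse_permission_string_py := by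
  intro s _
  unfold Spec_parse_permission_string_py parse_permission_string_py parse_permission_string_py_alt
  simp only [PySem.Str.len, PySem.Str.pyGet?_eq, PySem.Chars.pyGet?_eq_listPyGet?]
  by_cases h : ((s.length : Int)) = 9
  · have hl : s.toList.length = 9 := by
      simpa using (by exact_mod_cast h : s.length = 9)
    obtain ⟨c0, c1, c2, c3, c4, c5, c6, c7, c8, hs⟩ := pv_list9 s.toList hl
    simp only [hs]
    have k := pv_key (decide (c0 = '-')) (decide (c1 = '-')) (decide (c2 = '-'))
      (decide (c3 = '-')) (decide (c4 = '-')) (decide (c5 = '-'))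
      (decide (c6 = '-')) (decide (c7 = '-')) (decide (c8 = '-'))
    simp only [List.foldl, List.map, List.zip, List.zipWith, List.sum, decide_eq_true_eq] at k
    have e0 : PySem.List.slice [c0,c1,c2,c3,c4,c5,c6,c7,c8] (some (0:Int)) (some ((0:Int)+3)) = [c0,c1,c2] := rfl
    have e3 : PySem.List.slice [c0,c1,c2,c3,c4,c5,c6,c7,c8] (some (3:Int)) (some ((3:Int)+3)) = [c3,c4,c5] := rfl
    have e6 : PySem.List.slice [c0,c1,c2,c3,c4,c5,c6,c7,c8] (some (6:Int)) (some ((6:Int)+3)) = [c6,c7,c8] := rfl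
    simp only [List.foldl, List.map, List.zip, List.zipWith, List.sum,
      e0, e3, e6, pv_digit, PySem.List.pyGet?, PySem.List.pyIdx?, ite_not]
    simpa using k
  · simp [h]
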